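-- pv_equiv track=rewrite | github.com/solace-dgrama/tools | misc/parse_action_list.py | format_action_list_compact
-- ===== SOURCE A (Python) =====
-- from typing import List, Tuple, Dict
--
-- def format_action_list_compact(timestamp: str, actions: List[Dict[str, str]]) -> str:
--     """Format actions in compact list-by-list view."""
--
--     output = []
--     output.append(f"\n{'='*80}")
--     output.append(f"Action List at {timestamp}")
--     output.append(f"{'='*80}\n")
--
--     list_num = 1
--     current_list = []
--
--     for idx, action in enumerate(actions):
--         action_name = action['action']
--         target = action['target']
--         value = action['value']
--
--         if action_name == 'check':
--             # Output the current list
--             if current_list: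
--                 output.append(f"List {list_num} → check::{value}")
--                 output.append("-" * 60)
--                 for i, act_str in enumerate(current_list, 1):
--                     output.append(f"  {i:2d}. {act_str}")
--                 output.append("")
--                 current_list = []
--                 list_num += 1
--         else:
--             # Build action string
--             if action_name == 'sleep':
--                 act_str = f"sleep {value}s"
--             else:
--                 target_str = f":{target}" if target else ""
--                 value_str = f" = {value}" if value else ""
--                 act_str = f"{action_name}{target_str}{value_str}"
--
--             current_list.append(act_str)
--
--     # Handle any remaining actions
--     if current_list:
--         output.append(f"List {list_num} (incomplete)")
--         output.append("-" * 60)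
--         for i, act_str in enumerate(current_list, 1):
--             output.append(f"  {i:2d}. {act_str}")
--
--     return '\n'.join(output)
-- ===== SOURCE B (Python) =====
-- def format_action_list_compact(timestamp, actions):
--     """Format actions in compact list-by-list view (two-pass: group, then render)."""
--
--     def fmt(action):
--         name = action['action']
--         if name == 'sleep':
--             return f"sleep {action['value']}s"
--         target = action['target']
--         value = action['value']
--         return name + (f":{target}" if target else "") + (f" = {value}" if value else "")
--
--     # pass 1: collect completed groups (check value, buffered action strings)
--     groups = []
--     buf = []
--     for action in actions:
--         if action['action'] == 'check':
--             if buf: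
--                 groups.append((action['value'], buf))
--                 buf = []
--         else:
--             buf.append(fmt(action))
--
--     # pass 2: render
--     lines = [f"\n{'='*80}", f"Action List at {timestamp}", f"{'='*80}\n"]
--     for num, (val, items) in enumerate(groups, 1):
--         lines.append(f"List {num} → check::{val}")
--         lines.append("-" * 60)
--         lines.extend(f"  {i:2d}. {s}" for i, s in enumerate(items, 1))
--         lines.append("")
--     if buf:
--         lines.append(f"List {len(groups) + 1} (incomplete)")
--         lines.append("-" * 60)
--         lines.extend(f"  {i:2d}. {s}" for i, s in enumerate(buf, 1))
--     return '\n'.join(lines)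
-- ===== Notes on version B (the rewrite author's own statement) =====
-- stated objective: alternative
-- what changed: Replaces A's single stateful loop (output/list_num/current_list mutated together) with two passes: first collect completed (check-value, buffered-strings) groups plus a trailing buffer, then render header, numbered group blocks and the incomplete block from that structure.
import Mathlib
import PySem

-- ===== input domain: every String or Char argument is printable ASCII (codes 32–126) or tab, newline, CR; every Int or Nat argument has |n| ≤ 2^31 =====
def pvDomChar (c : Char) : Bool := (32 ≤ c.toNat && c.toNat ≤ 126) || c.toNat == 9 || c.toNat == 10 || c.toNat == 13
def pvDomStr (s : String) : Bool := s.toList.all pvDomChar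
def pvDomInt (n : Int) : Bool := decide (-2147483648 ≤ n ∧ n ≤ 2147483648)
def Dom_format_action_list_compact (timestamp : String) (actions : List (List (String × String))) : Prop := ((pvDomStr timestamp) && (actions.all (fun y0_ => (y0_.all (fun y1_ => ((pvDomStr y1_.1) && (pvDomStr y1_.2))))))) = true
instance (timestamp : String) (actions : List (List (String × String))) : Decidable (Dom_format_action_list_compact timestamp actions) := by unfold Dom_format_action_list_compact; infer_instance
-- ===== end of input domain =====

-- B is an alternative decomposition (group-then-render in two passes instead of A's single
-- stateful loop); return values proved equal wherever Python A returns (Pre_ = all three keys present).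

def pvEq80 : String := String.ofList (List.replicate 80 '=')
def pvDash60 : String := String.ofList (List.replicate 60 '-')

-- ===== PORT A =====
-- f"{i:2d}": right-align to width 2 with spaces
def pvPadA (n : Int) : String :=
  let s := PySem.Int.toStr n
  if PySem.Str.len s < 2 then " " ++ s else s

-- for i, act_str in enumerate(current_list, 1): output.append(f"  {i:2d}. {act_str}")
def pvNumA : Int → List String → List String
  | _, [] => []
  | i, s :: rest => ("  " ++ pvPadA i ++ ". " ++ s) :: pvNumA (i + 1) rest

-- the main for-loop, state = (output, list_num, current_list)
def pvLoopA : List (List (String × String)) → List String × Int × List String → List String × Int × List String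
  | [], st => st
  | a :: rest, (out, ln, cur) =>
    let d := PySem.Dict.ofList a
    let name := d.getD "action" ""
    let target := d.getD "target" ""
    let value := d.getD "value" ""
    if name = "check" then
      if cur.isEmpty then pvLoopA rest (out, ln, cur)
      else pvLoopA rest
        (out ++ ["List " ++ PySem.Int.toStr ln ++ " → check::" ++ value, pvDash60]
             ++ pvNumA 1 cur ++ [""], ln + 1, [])
    else
      let act_str :=
        if name = "sleep" then "sleep " ++ value ++ "s"
        else name ++ (if target = "" then "" else ":" ++ target)
                  ++ (if value = "" then "" else " = " ++ value)
      pvLoopA rest (out, ln, cur ++ [act_str])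

def format_action_list_compact (timestamp : String) (actions : List (List (String × String))) : String :=
  let header := ["\n" ++ pvEq80, "Action List at " ++ timestamp, pvEq80 ++ "\n"]
  match pvLoopA actions (header, 1, []) with
  | (out, ln, cur) =>
    let out2 := if cur.isEmpty then out
      else out ++ ["List " ++ PySem.Int.toStr ln ++ " (incomplete)", pvDash60] ++ pvNumA 1 cur
    PySem.Str.join "\n" out2

-- ===== PORT B =====
def pvFmtB (d : PySem.Dict String String) : String :=
  let name := d.getD "action" ""
  if name = "sleep" then "sleep " ++ d.getD "value" "" ++ "s"
  else
    let target := d.getD "target" ""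
    let value := d.getD "value" ""
    name ++ (if target = "" then "" else ":" ++ target)
         ++ (if value = "" then "" else " = " ++ value)

-- pass 1: (completed groups, trailing buffer)
def pvGroupsB : List (List (String × String)) → List String → List (String × List String) × List String
  | [], buf => ([], buf)
  | a :: rest, buf =>
    let d := PySem.Dict.ofList a
    if d.getD "action" "" = "check" then
      if buf.isEmpty then pvGroupsB rest buf
      else
        let r := pvGroupsB rest []
        ((d.getD "value" "", buf) :: r.1, r.2)
    else pvGroupsB rest (buf ++ [pvFmtB d])

def pvPadB (n : Int) : String :=
  let s := PySem.Int.toStr n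
  if PySem.Str.len s < 2 then " " ++ s else s

-- enumerate(items, 1) comprehension
def pvNumB : Int → List String → List String
  | _, [] => []
  | i, s :: rest => ("  " ++ pvPadB i ++ ". " ++ s) :: pvNumB (i + 1) rest

-- pass 2: enumerate(groups, 1)
def pvRenderB : Int → List (String × List String) → List String
  | _, [] => []
  | n, (v, items) :: gs =>
      ("List " ++ PySem.Int.toStr n ++ " → check::" ++ v) :: pvDash60 ::
        (pvNumB 1 items ++ [""] ++ pvRenderB (n + 1) gs)

def format_action_list_compact_alt (timestamp : String) (actions : List (List (String × String))) : String :=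
  let r := pvGroupsB actions []
  let lines :=
    ["\n" ++ pvEq80, "Action List at " ++ timestamp, pvEq80 ++ "\n"]
    ++ pvRenderB 1 r.1
    ++ (if r.2.isEmpty then []
        else ("List " ++ PySem.Int.toStr ((r.1.length : Int) + 1) ++ " (incomplete)")
             :: pvDash60 :: pvNumB 1 r.2)
  PySem.Str.join "\n" lines

-- ===== PRECONDITION & SPEC =====
-- Python A does action['action'] / ['target'] / ['value'] on every action: a missing key raises
-- KeyError, so Pre_ requires every action dict to carry all three keys.
def Pre_format_action_list_compact (timestamp : String) (actions : List (List (String × String))) : Prop :=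
  ∀ a ∈ actions, "action" ∈ a.map Prod.fst ∧ "target" ∈ a.map Prod.fst ∧ "value" ∈ a.map Prod.fst
instance (timestamp : String) (actions : List (List (String × String))) : Decidable (Pre_format_action_list_compact timestamp actions) := by unfold Pre_format_action_list_compact; infer_instance

def pvWitness_format_action_list_compact : String × (List (List (String × String))) :=
  ("2024-01-01", [[("action", "click"), ("target", "btn"), ("value", "")],
                  [("action", "check"), ("target", ""), ("value", "ok")]])

def Spec_format_action_list_compact (timestamp : String) (actions : List (List (String × String))) (out : String) : Prop := out = format_action_list_compact_alt timestamp actions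
instance (timestamp : String) (actions : List (List (String × String))) (out : String) : Decidable (Spec_format_action_list_compact timestamp actions out) := by unfold Spec_format_action_list_compact; infer_instance

-- ===== CLAIM (what is proved, stated in full; the proofs are below) =====
def Claim_equal_format_action_list_compact : Prop := ∀ (timestamp : String) (actions : List (List (String × String))), Dom_format_action_list_compact timestamp actions → Pre_format_action_list_compact timestamp actions → Spec_format_action_list_compact timestamp actions (format_action_list_compact timestamp actions)

-- ===== LEMMAS AND PROOFS =====

theorem pvNumB_eq_pvNumA (i : Int) (xs : List String) : pvNumB i xs = pvNumA i xs := by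
  induction xs generalizing i with
  | nil => rfl
  | cons s rest ih => simp [pvNumA, pvNumB, pvPadA, pvPadB, ih]

-- A's after-loop "incomplete" trailer
def pvFinish : List String × Int × List String → List String
  | (out, ln, cur) =>
    if cur.isEmpty then out
    else out ++ ["List " ++ PySem.Int.toStr ln ++ " (incomplete)", pvDash60] ++ pvNumA 1 cur

-- B's trailer, numbered ln
def pvTailB (ln : Int) (buf : List String) : List String :=
  if buf.isEmpty then []
  else ("List " ++ PySem.Int.toStr ln ++ " (incomplete)") :: pvDash60 :: pvNumB 1 buf

theorem pvLoopA_eq_groups (rest : List (List (String × String))) :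
    ∀ (cur out : List String) (ln : Int),
    pvFinish (pvLoopA rest (out, ln, cur)) =
      out ++ pvRenderB ln (pvGroupsB rest cur).1
          ++ pvTailB (ln + ((pvGroupsB rest cur).1.length : Int)) (pvGroupsB rest cur).2 := by
  induction rest with
  | nil =>
    intro cur out ln
    cases cur with
    | nil => simp [pvLoopA, pvGroupsB, pvFinish, pvRenderB, pvTailB]
    | cons c cs =>
      simp [pvLoopA, pvGroupsB, pvFinish, pvRenderB, pvTailB, pvNumB_eq_pvNumA]
  | cons a rest ih =>
    intro cur out ln
    by_cases hc : (PySem.Dict.ofList a).getD "action" "" = "check"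
    · cases cur with
      | nil => simpa [pvLoopA, pvGroupsB, hc] using ih [] out ln
      | cons c cs =>
        have h1 := ih [] (out ++ ["List " ++ PySem.Int.toStr ln ++ " → check::"
            ++ (PySem.Dict.ofList a).getD "value" "", pvDash60] ++ pvNumA 1 (c :: cs) ++ [""]) (ln + 1)
        simp only [pvLoopA, pvGroupsB, hc, if_pos, List.isEmpty_cons, Bool.false_eq_true,
          if_false] at h1 ⊢
        rw [h1]
        have harith : (ln + 1) + (((pvGroupsB rest []).1.length : Nat) : Int)
            = ln + (((pvGroupsB rest []).1.length + 1 : Nat) : Int) := by push_cast; ring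
        rw [harith]
        simp [pvRenderB, pvNumB_eq_pvNumA]
    · have h1 := ih (cur ++ [pvFmtB (PySem.Dict.ofList a)]) out ln
      simp only [pvLoopA, pvGroupsB, hc, if_false] at h1 ⊢
      simpa [pvFmtB] using h1

-- ===== VERDICT (by name: the statement is the Claim_ definition above) =====
theorem format_action_list_compact_spec : Claim_equal_format_action_list_compact := by
  intro timestamp actions _ _
  unfold Spec_format_action_list_compact
  unfold format_action_list_compact format_action_list_compact_alt
  have h := pvLoopA_eq_groups actions []
    ["\n" ++ pvEq80, "Action List at " ++ timestamp, pvEq80 ++ "\n"] 1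
  have hfin : ∀ st : List String × Int × List String,
      (match st with
       | (out, ln, cur) =>
         PySem.Str.join "\n" (if cur.isEmpty then out
           else out ++ ["List " ++ PySem.Int.toStr ln ++ " (incomplete)", pvDash60] ++ pvNumA 1 cur))
      = PySem.Str.join "\n" (pvFinish st) := by
    rintro ⟨out, ln, cur⟩; rfl
  rw [hfin, h]
  have harith : (1 : Int) + (((pvGroupsB actions []).1.length : Nat) : Int)
      = (((pvGroupsB actions []).1.length : Nat) : Int) + 1 := by ring
  rw [harith]
  simp [pvTailB]
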